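-- pv_equiv track=rewrite | github.com/anthonypt87/coding_katas | array_sums.py | find_pair_sums
-- ===== SOURCE A (Python) =====
-- def find_pair_sums(numbers, k):
--     numbers = set(numbers)
--
--     output = set()
--     for number in numbers:
--         target_number = k - number
--         if target_number in numbers:
--             output.add(
--                 (
--                     min(number, target_number),
--                     max(number, target_number)
--                 )
--             )
--
--     return output
-- ===== SOURCE B (Python) =====
-- def find_pair_sums(numbers, k):
--     # Two-pointer sweep over the sorted distinct values.
--     arr = sorted(set(numbers))
--     out = set()
--     lo, hi = 0, len(arr) - 1
--     while lo <= hi: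
--         s = arr[lo] + arr[hi]
--         if s == k:
--             out.add((arr[lo], arr[hi]))
--             lo += 1
--             hi -= 1
--         elif s < k:
--             lo += 1
--         else:
--             hi -= 1
--     return out
-- ===== Notes on version B (the rewrite author's own statement) =====
-- stated objective: alternative
-- what changed: Replaces the hash-set scan that tests k-x membership for every distinct value with a two-pointer sweep over the sorted distinct values (lo<=hi so the self-pair (v,v) with 2v==k falls out of the same loop).
import Mathlib
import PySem

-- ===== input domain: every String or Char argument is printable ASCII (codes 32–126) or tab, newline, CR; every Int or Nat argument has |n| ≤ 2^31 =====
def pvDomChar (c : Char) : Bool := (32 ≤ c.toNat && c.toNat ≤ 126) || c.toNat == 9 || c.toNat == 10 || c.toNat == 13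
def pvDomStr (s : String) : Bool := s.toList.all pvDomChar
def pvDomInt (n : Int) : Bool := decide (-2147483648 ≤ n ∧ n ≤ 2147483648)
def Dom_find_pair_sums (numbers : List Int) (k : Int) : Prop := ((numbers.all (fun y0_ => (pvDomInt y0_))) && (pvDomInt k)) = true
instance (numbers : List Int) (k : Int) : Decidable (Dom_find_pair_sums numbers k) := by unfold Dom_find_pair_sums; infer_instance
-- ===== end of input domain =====

-- B replaces A's per-element hash lookup of k - x with a two-pointer sweep over the sorted
-- distinct values (alternative algorithm; the returned set of pairs is identical).
-- Both functions return a Python set; Python's hash iteration/insertion order is not modelled: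
-- the ports fix a canonical enumeration and the result is compared as a finite set.

-- ===== PORT A =====
-- 'for number in numbers' iterates a hash set in unspecified order; since the loop only builds
-- another set, any enumeration yields the same set value — the port enumerates in sorted order.
def find_pair_sums (numbers : List Int) (k : Int) : List (Int × Int) :=
  let nset : PySem.Set Int := PySem.Set.ofList numbers
  (PySem.List.sorted nset (fun x => x) false).foldl
    (fun output number =>
      let target_number := k - number
      if PySem.Set.contains nset target_number then
        PySem.Set.add output (min number target_number, max number target_number)
      else output)
    PySem.Set.empty

-- ===== PORT B =====
-- the while loop of Source B: lo/hi two-pointer over arr, accumulating the output set.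
-- The loop is ported with a structural fuel of arr.length iterations: the span hi + 1 - lo
-- starts at arr.length and strictly shrinks each iteration, so the fuel is never exhausted.
def twoPtrLoop (arr : List Int) (k : Int) : Nat → Int → Int → PySem.Set (Int × Int) →
    PySem.Set (Int × Int)
  | 0, _, _, out => out
  | fuel + 1, lo, hi, out =>
    if lo ≤ hi then
      let a := PySem.List.pyGetD arr lo 0
      let b := PySem.List.pyGetD arr hi 0
      if a + b = k then twoPtrLoop arr k fuel (lo + 1) (hi - 1) (PySem.Set.add out (a, b))
      else if a + b < k then twoPtrLoop arr k fuel (lo + 1) hi out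
      else twoPtrLoop arr k fuel lo (hi - 1) out
    else out

def find_pair_sums_alt (numbers : List Int) (k : Int) : List (Int × Int) :=
  let arr := PySem.List.sorted (PySem.Set.ofList numbers) (fun x => x) false
  twoPtrLoop arr k arr.length 0 ((arr.length : Int) - 1) PySem.Set.empty

-- ===== PRECONDITION & SPEC =====
def Spec_find_pair_sums (numbers : List Int) (k : Int) (out : List (Int × Int)) : Prop := out = find_pair_sums_alt numbers k
instance (numbers : List Int) (k : Int) (out : List (Int × Int)) : Decidable (Spec_find_pair_sums numbers k out) := by unfold Spec_find_pair_sums; infer_instance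

-- ===== CLAIM (what is proved, stated in full; the proofs are below) =====
def Claim_equal_find_pair_sums : Prop := ∀ (numbers : List Int) (k : Int), Dom_find_pair_sums numbers k → Spec_find_pair_sums numbers k (find_pair_sums numbers k)

-- ===== LEMMAS AND PROOFS =====

-- the common normal form: for each v of l (ascending), the pair (v, k - v) whenever the partner
-- is in `mem` and v is the smaller half
def pvF (k : Int) (mem l : List Int) : List (Int × Int) :=
  l.filterMap (fun v => if (k - v) ∈ mem ∧ 2 * v ≤ k then some (v, k - v) else none)

theorem pvF_nil (k : Int) (mem : List Int) : pvF k mem [] = [] := rfl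

theorem pvF_fst_mem {k : Int} {mem l : List Int} {p : Int × Int} (hp : p ∈ pvF k mem l) :
    p.1 ∈ l := by
  unfold pvF at hp
  simp only [List.mem_filterMap] at hp
  obtain ⟨v, hv, hcond⟩ := hp
  split at hcond
  · cases hcond; exact hv
  · cases hcond

theorem pvF_congr_mem {k : Int} {mem mem' l : List Int}
    (h : ∀ v ∈ l, 2 * v ≤ k → ((k - v) ∈ mem ↔ (k - v) ∈ mem')) :
    pvF k mem l = pvF k mem' l := by
  unfold pvF
  apply List.filterMap_congr
  intro v hv
  by_cases h2 : 2 * v ≤ k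
  · by_cases hm : (k - v) ∈ mem
    · have hm' := (h v hv h2).mp hm
      simp [hm, h2, hm']
    · have hm' : (k - v) ∉ mem' := fun hc => hm ((h v hv h2).mpr hc)
      simp [hm, hm']
  · simp [h2]

theorem pvF_append (k : Int) (mem l₁ l₂ : List Int) :
    pvF k mem (l₁ ++ l₂) = pvF k mem l₁ ++ pvF k mem l₂ := by
  unfold pvF; exact List.filterMap_append

theorem pvF_singleton_pos {k v : Int} {mem : List Int} (h1 : (k - v) ∈ mem) (h2 : 2 * v ≤ k) :
    pvF k mem [v] = [(v, k - v)] := by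
  unfold pvF; simp [h1, h2]

theorem pvF_singleton_neg {k v : Int} {mem : List Int} (h : ¬((k - v) ∈ mem ∧ 2 * v ≤ k)) :
    pvF k mem [v] = [] := by
  unfold pvF; simp only [List.filterMap_cons, List.filterMap_nil, if_neg h]

-- G2: dropping the minimum a when a + b < k (b bounds the list above)
theorem pvF_drop_head {k a b : Int} {t : List Int}
    (hb : ∀ x ∈ a :: t, x ≤ b) (hab : a + b < k) :
    pvF k (a :: t) (a :: t) = pvF k t t := by
  have hcong : pvF k (a :: t) t = pvF k t t := by
    apply pvF_congr_mem
    intro v hv _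
    constructor
    · intro hm
      rcases List.mem_cons.mp hm with h | h
      · exfalso
        have hvb : v ≤ b := hb v (List.mem_cons_of_mem _ hv)
        omega
      · exact h
    · exact List.mem_cons_of_mem _
  have hhead : pvF k (a :: t) [a] = [] := by
    apply pvF_singleton_neg
    rintro ⟨hm, _⟩
    have : k - a ≤ b := hb _ hm
    omega
  calc pvF k (a :: t) (a :: t) = pvF k (a :: t) ([a] ++ t) := rfl
    _ = pvF k (a :: t) [a] ++ pvF k (a :: t) t := pvF_append ..
    _ = pvF k t t := by rw [hhead, hcong]; rfl

-- G3: dropping the maximum b when k < a + b (a bounds the list below)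
theorem pvF_drop_last {k a b : Int} {l : List Int}
    (ha : ∀ x ∈ l ++ [b], a ≤ x) (hab : k < a + b) :
    pvF k (l ++ [b]) (l ++ [b]) = pvF k l l := by
  have hcong : pvF k (l ++ [b]) l = pvF k l l := by
    apply pvF_congr_mem
    intro v hv _
    constructor
    · intro hm
      rcases List.mem_append.mp hm with h | h
      · exact h
      · exfalso
        have hvb : k - v = b := by simpa using h
        have hav : a ≤ v := ha v (List.mem_append_left _ hv)
        omega
    · exact List.mem_append_left _
  have hlast : pvF k (l ++ [b]) [b] = [] := by
    apply pvF_singleton_neg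
    rintro ⟨_, h2⟩
    have : a ≤ b := ha b (List.mem_append_right _ (by simp))
    omega
  rw [pvF_append, hcong, hlast, List.append_nil]

-- G1: extracting the extremal pair (a, b) when a + b = k, on a strictly sorted a :: m ++ [b]
theorem pvF_extract {k a b : Int} {m : List Int}
    (hs : (a :: (m ++ [b])).Pairwise (· < ·)) (hab : a + b = k) :
    pvF k (a :: (m ++ [b])) (a :: (m ++ [b])) = (a, b) :: pvF k m m := by
  have hlt : ∀ x ∈ m ++ [b], a < x := (List.pairwise_cons.mp hs).1
  have hsm : (m ++ [b]).Pairwise (· < ·) := (List.pairwise_cons.mp hs).2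
  have hmb : ∀ x ∈ m, x < b := by
    intro x hx
    have := (List.pairwise_append.mp hsm).2.2
    exact this x hx b (by simp)
  have haltb : a < b := hlt b (List.mem_append_right _ (by simp))
  -- the head pair
  have hhead : pvF k (a :: (m ++ [b])) [a] = [(a, b)] := by
    have : k - a = b := by omega
    rw [pvF_singleton_pos (by rw [this]; simp) (by omega), this]
  -- b itself is dropped
  have hlastdrop : pvF k (a :: (m ++ [b])) [b] = [] := by
    apply pvF_singleton_neg
    rintro ⟨_, h2⟩
    omega
  -- middle membership congruence
  have hcong : pvF k (a :: (m ++ [b])) m = pvF k m m := by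
    apply pvF_congr_mem
    intro v hv _
    have hav : a < v := hlt v (List.mem_append_left _ hv)
    have hvb : v < b := hmb v hv
    constructor
    · intro hm
      rcases List.mem_cons.mp hm with h | h
      · exfalso; omega
      · rcases List.mem_append.mp h with h' | h'
        · exact h'
        · exfalso
          have : k - v = b := by simpa using h'
          omega
    · exact fun h => List.mem_cons_of_mem _ (List.mem_append_left _ h)
  calc pvF k (a :: (m ++ [b])) (a :: (m ++ [b]))
      = pvF k (a :: (m ++ [b])) ([a] ++ (m ++ [b])) := rfl
    _ = pvF k (a :: (m ++ [b])) [a] ++ (pvF k (a :: (m ++ [b])) m ++ pvF k (a :: (m ++ [b])) [b]) := by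
        rw [pvF_append, pvF_append]
    _ = (a, b) :: pvF k m m := by rw [hhead, hlastdrop, hcong, List.append_nil]; rfl

-- ---- slice decompositions ----

theorem slice_head {arr : List Int} {lo hi : Int} (h0 : 0 ≤ lo) (h1 : lo ≤ hi)
    (h2 : hi < arr.length) :
    PySem.List.slice arr (some lo) (some (hi + 1)) =
      PySem.List.pyGetD arr lo 0 :: PySem.List.slice arr (some (lo + 1)) (some (hi + 1)) := by
  have hlt : lo.toNat < arr.length := by omega
  rw [PySem.List.slice_toNat arr (by omega) (by omega), PySem.List.slice_toNat arr (by omega) (by omega),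
    PySem.List.pyGetD_eq_getElem arr 0 (by omega) (by omega), List.drop_eq_getElem_cons hlt]
  have h3 : (hi + 1).toNat - lo.toNat = ((hi + 1).toNat - (lo + 1).toNat) + 1 := by omega
  have h4 : (lo + 1).toNat = lo.toNat + 1 := by omega
  rw [h3, h4, List.take_succ_cons]

theorem slice_last {arr : List Int} {lo hi : Int} (h0 : 0 ≤ lo) (h1 : lo ≤ hi)
    (h2 : hi < arr.length) :
    PySem.List.slice arr (some lo) (some (hi + 1)) =
      PySem.List.slice arr (some lo) (some hi) ++ [PySem.List.pyGetD arr hi 0] := by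
  rw [PySem.List.slice_toNat arr (by omega) (by omega), PySem.List.slice_toNat arr (by omega) (by omega),
    PySem.List.pyGetD_eq_getElem arr 0 (by omega) h2]
  have h3 : (hi + 1).toNat - lo.toNat = (hi.toNat - lo.toNat) + 1 := by omega
  rw [h3, List.take_add_one, List.getElem?_drop]
  have h4 : lo.toNat + (hi.toNat - lo.toNat) = hi.toNat := by omega
  rw [h4, List.getElem?_eq_getElem (by omega)]
  rfl

theorem slice_empty {arr : List Int} {lo hi : Int} (h0 : 0 ≤ lo) (h1 : hi < lo)
    (h2 : -1 ≤ hi) : PySem.List.slice arr (some lo) (some (hi + 1)) = [] := by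
  rw [PySem.List.slice_toNat arr (by omega) (by omega)]
  have : (hi + 1).toNat - lo.toNat = 0 := by omega
  rw [this, List.take_zero]

theorem slice_pairwise {arr : List Int} (hs : arr.Pairwise (· < ·)) {a b : Int}
    (ha : 0 ≤ a) (hb : 0 ≤ b) :
    (PySem.List.slice arr (some a) (some b)).Pairwise (· < ·) := by
  rw [PySem.List.slice_toNat arr ha hb]
  exact List.Pairwise.sublist ((List.take_sublist _ _).trans (List.drop_sublist _ _)) hs

theorem slice_mono_stop {arr : List Int} {lo c d : Int} (h0 : 0 ≤ lo) (hc : 0 ≤ c)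
    (hcd : c ≤ d) :
    ∀ x ∈ PySem.List.slice arr (some lo) (some c), x ∈ PySem.List.slice arr (some lo) (some d) := by
  intro x hx
  rw [PySem.List.slice_toNat arr h0 hc] at hx
  rw [PySem.List.slice_toNat arr h0 (by omega)]
  have heq : List.take (c.toNat - lo.toNat) (List.drop lo.toNat arr) =
      List.take (c.toNat - lo.toNat)
        (List.take (d.toNat - lo.toNat) (List.drop lo.toNat arr)) := by
    rw [List.take_take]
    congr 1
    omega
  rw [heq] at hx
  exact List.take_subset _ _ hx

-- ---- the two-pointer loop computes pvF of the remaining slice ----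

theorem twoPtr_spec (arr : List Int) (k : Int) (hs : arr.Pairwise (· < ·)) :
    ∀ (fuel : Nat) (lo hi : Int), (hi + 1 - lo).toNat ≤ fuel → 0 ≤ lo → -1 ≤ hi →
    hi < arr.length →
    ∀ out : List (Int × Int),
      (∀ p ∈ out, p.1 ∉ PySem.List.slice arr (some lo) (some (hi + 1))) →
      twoPtrLoop arr k fuel lo hi out =
        out ++ pvF k (PySem.List.slice arr (some lo) (some (hi + 1)))
                    (PySem.List.slice arr (some lo) (some (hi + 1))) := by
  intro fuel
  induction fuel with
  | zero =>
    intro lo hi hn h0 h1 h2 out hout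
    rw [show twoPtrLoop arr k 0 lo hi out = out from rfl,
      slice_empty h0 (by omega) h1, pvF_nil, List.append_nil]
  | succ f IH =>
    intro lo hi hn h0 h1 h2 out hout
    by_cases hguard : lo ≤ hi
    · -- one loop iteration
      simp only [twoPtrLoop, if_pos hguard]
      have hhead := slice_head h0 hguard h2
      have hlast := slice_last h0 hguard h2
      set a := PySem.List.pyGetD arr lo 0 with hadef
      set b := PySem.List.pyGetD arr hi 0 with hbdef
      set s := PySem.List.slice arr (some lo) (some (hi + 1)) with hsdef
      set t := PySem.List.slice arr (some (lo + 1)) (some (hi + 1)) with htdef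
      have hp : s.Pairwise (· < ·) := slice_pairwise hs h0 (by omega)
      have ha_mem : a ∈ s := by rw [hhead]; exact List.mem_cons_self
      have ha_lt : ∀ x ∈ t, a < x := by
        have := hp; rw [hhead] at this; exact (List.pairwise_cons.mp this).1
      have hb_le : ∀ x ∈ s, x ≤ b := by
        intro x hx
        rw [hlast] at hx hp
        rcases List.mem_append.mp hx with h | h
        · exact le_of_lt ((List.pairwise_append.mp hp).2.2 x h b (by simp))
        · simp at h; omega
      have ha_le : ∀ x ∈ s, a ≤ x := by
        intro x hx
        rw [hhead] at hx
        rcases List.mem_cons.mp hx with h | h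
        · omega
        · exact le_of_lt (ha_lt x h)
      by_cases habk : a + b = k
      · simp only [if_pos habk]
        have hnotmem : (a, b) ∉ out := fun hmem => hout _ hmem ha_mem
        rw [PySem.Set.add_of_not_mem hnotmem]
        -- the remaining middle slice
        set m := PySem.List.slice arr (some (lo + 1)) (some (hi - 1 + 1)) with hmdef
        have hm_sub : ∀ x ∈ m, x ∈ t :=
          fun x hx => slice_mono_stop (by omega) (by omega) (by omega) x hx
        have hIH := IH (lo + 1) (hi - 1) (by omega)
          (by omega) (by omega) (by omega) (out ++ [(a, b)]) ?_
        · rw [hIH, ← hmdef]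
          suffices hsf : pvF k s s = (a, b) :: pvF k m m by
            rw [hsf]; simp
          by_cases hlh : lo < hi
          · -- s = a :: m ++ [b]
            have ht_split : t = m ++ [b] := by
              rw [htdef, hbdef, hmdef, show (hi : Int) + 1 = hi - 1 + 1 + 1 by ring]
              have := slice_last (arr := arr) (lo := lo + 1) (hi := hi - 1 + 1) (by omega)
                (by omega) (by omega)
              simp only [show hi - 1 + 1 = hi by ring] at this ⊢
              exact this
            have hshape : s = a :: (m ++ [b]) := by rw [hhead, ht_split]
            rw [hshape]
            exact pvF_extract (by rw [← hshape]; exact hp) habk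
          · -- lo = hi : s = [a], a = b, 2a = k
            have hlo : lo = hi := by omega
            have hab : a = b := by rw [hadef, hbdef, hlo]
            have ht_nil : t = [] := by
              rw [htdef, show (hi : Int) + 1 = hi + 1 - 1 + 1 by ring]
              exact slice_empty (by omega) (by omega) (by omega)
            have hm_nil : m = [] := by
              rw [hmdef, slice_empty (by omega) (by omega) (by omega)]
            have hs_single : s = [a] := by rw [hhead, ht_nil]
            rw [hs_single, hm_nil, pvF_singleton_pos (by simp; omega) (by omega)]
            have : k - a = b := by omega
            rw [this, ← hab]
            rfl
        · -- hout for the recursive call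
          intro p hp'
          rcases List.mem_append.mp hp' with h | h
          · intro hmm
            exact hout p h (by rw [hhead]; exact List.mem_cons_of_mem _ (hm_sub _ hmm))
          · simp at h
            subst h
            intro hmm
            have := ha_lt _ (hm_sub _ hmm)
            simp at this
      · simp only [if_neg habk]
        by_cases hltk : a + b < k
        · simp only [if_pos hltk]
          have hIH := IH (lo + 1) hi (by omega)
            (by omega) (by omega) (by omega) out ?_
          · rw [hIH, ← htdef]
            suffices hsf : pvF k s s = pvF k t t by rw [hsf]
            have : s = a :: t := hhead
            rw [this]
            exact pvF_drop_head (by rw [← this]; exact hb_le) hltk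
          · intro p hp' hmm
            exact hout p hp' (by rw [hhead]; exact List.mem_cons_of_mem _ hmm)
        · simp only [if_neg hltk]
          have hgtk : k < a + b := by omega
          have hIH := IH lo (hi - 1) (by omega)
            (by omega) (by omega) (by omega) out ?_
          · set l := PySem.List.slice arr (some lo) (some (hi - 1 + 1)) with hldef
            have hl_eq : l = PySem.List.slice arr (some lo) (some hi) := by
              rw [hldef, show hi - 1 + 1 = hi by ring]
            rw [hIH]
            suffices hsf : pvF k s s = pvF k l l by rw [hsf]
            have hshape : s = l ++ [b] := by rw [hl_eq]; exact hlast
            rw [hshape]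
            exact pvF_drop_last (by rw [← hshape]; exact ha_le) hgtk
          · intro p hp' hmm
            apply hout p hp'
            rw [hlast]
            apply List.mem_append_left
            rw [show hi - 1 + 1 = (hi : Int) by ring] at hmm
            exact hmm
    · simp only [twoPtrLoop, if_neg hguard]
      rw [slice_empty h0 (by omega) h1, pvF_nil, List.append_nil]

-- ---- the A-side fold computes pvF of the whole sorted list ----

theorem foldA_spec (arr : List Int) (k : Int) (hs : arr.Pairwise (· < ·))
    (nset : List Int) (hm : ∀ t : Int, t ∈ nset ↔ t ∈ arr) :
    ∀ (l₂ l₁ : List Int), arr = l₁ ++ l₂ →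
      l₂.foldl
        (fun output number =>
          if PySem.Set.contains nset (k - number) then
            PySem.Set.add output (min number (k - number), max number (k - number))
          else output)
        (pvF k arr l₁) = pvF k arr arr := by
  intro l₂
  induction l₂ with
  | nil =>
    intro l₁ heq
    simp only [List.foldl_nil]
    rw [heq, List.append_nil]
  | cons v rest IHr =>
    intro l₁ heq
    have hlt_l₁ : ∀ x ∈ l₁, x < v := by
      intro x hx
      rw [heq] at hs
      exact (List.pairwise_append.mp hs).2.2 x hx v List.mem_cons_self
    have hlt_rest : ∀ x ∈ rest, v < x := by
      intro x hx
      rw [heq] at hs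
      exact (List.pairwise_cons.mp (List.pairwise_append.mp hs).2.1).1 x hx
    have hv_arr : v ∈ arr := by rw [heq]; exact List.mem_append_right _ List.mem_cons_self
    rw [List.foldl_cons]
    have hstep :
        (if PySem.Set.contains nset (k - v) then
          PySem.Set.add (pvF k arr l₁) (min v (k - v), max v (k - v))
        else pvF k arr l₁) = pvF k arr (l₁ ++ [v]) := by
      rw [pvF_append]
      by_cases hmem : (k - v) ∈ arr
      · have hcont : PySem.Set.contains nset (k - v) = true :=
          (PySem.Set.contains_iff _ _).mpr ((hm _).mpr hmem)
        rw [if_pos hcont]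
        by_cases h2 : 2 * v ≤ k
        · have hmin : min v (k - v) = v := by omega
          have hmax : max v (k - v) = k - v := by omega
          rw [hmin, hmax, pvF_singleton_pos hmem h2]
          apply PySem.Set.add_of_not_mem
          intro hin
          have : (v, k - v).1 ∈ l₁ := pvF_fst_mem hin
          exact absurd (hlt_l₁ _ this) (lt_irrefl v)
        · have hmin : min v (k - v) = k - v := by omega
          have hmax : max v (k - v) = v := by omega
          rw [hmin, hmax, pvF_singleton_neg (fun hc => h2 hc.2), List.append_nil]
          apply PySem.Set.add_of_mem
          have hu_l₁ : (k - v) ∈ l₁ := by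
            have h216 : (k - v) ∈ l₁ ++ v :: rest := by rw [← heq]; exact hmem
            rcases List.mem_append.mp h216 with h | h
            · exact h
            · rcases List.mem_cons.mp h with h' | h'
              · omega
              · exact absurd (hlt_rest _ h') (by omega)
          unfold pvF
          rw [List.mem_filterMap]
          refine ⟨k - v, hu_l₁, ?_⟩
          have hc1 : (k - (k - v)) ∈ arr := by
            rw [show k - (k - v) = v by ring]; exact hv_arr
          rw [if_pos ⟨hc1, by omega⟩]
          rw [show k - (k - v) = v by ring]
      · have hcont : PySem.Set.contains nset (k - v) = false := by
          rw [Bool.eq_false_iff]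
          intro hc
          exact hmem ((hm _).mp ((PySem.Set.contains_iff _ _).mp hc))
        rw [hcont, if_neg (by simp), pvF_singleton_neg (fun hc => hmem hc.1), List.append_nil]
    rw [hstep]
    exact IHr (l₁ ++ [v]) (by rw [heq, List.append_assoc]; rfl)

-- ===== VERDICT (by name: the statement is the Claim_ definition above) =====
theorem find_pair_sums_spec : Claim_equal_find_pair_sums := by
  unfold Claim_equal_find_pair_sums
  intro numbers k _
  unfold Spec_find_pair_sums find_pair_sums find_pair_sums_alt
  simp only []
  set arr := PySem.List.sorted (PySem.Set.ofList numbers) (fun x => x) false with harr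
  have hs : arr.Pairwise (· < ·) := PySem.List.sorted_ofList_pairwise_lt numbers
  have hm : ∀ t : Int, t ∈ PySem.Set.ofList numbers ↔ t ∈ arr := by
    intro t
    rw [harr, PySem.List.mem_sorted]
  have hA := foldA_spec arr k hs (PySem.Set.ofList numbers) hm arr [] rfl
  have hB := twoPtr_spec arr k hs arr.length 0
    ((arr.length : Int) - 1) (by omega) (by omega) (by omega) (by omega)
    (PySem.Set.empty) (by simp [PySem.Set.empty])
  have hslice : PySem.List.slice arr (some 0) (some ((arr.length : Int) - 1 + 1)) = arr := by
    rw [show (arr.length : Int) - 1 + 1 = (arr.length : Int) by ring,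
      PySem.List.slice_toNat arr (by omega) (by omega)]
    simp
  rw [hslice] at hB
  have hB' : twoPtrLoop arr k arr.length 0 ((arr.length : Int) - 1) PySem.Set.empty
      = pvF k arr arr := by
    rw [hB]; simp [PySem.Set.empty]
  rw [hB']
  exact hA
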